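-- pv_equiv track=rewrite | github.com/amazonking-dev/avature-ats-scraper | scraper/endpoint_detector.py | _prioritize_endpoints
-- ===== SOURCE A (Python) =====
-- from typing import Optional, Dict, Any, List, Set
--
-- def _prioritize_endpoints(
--
--     endpoint_templates: List[tuple],
--     config_hints: Optional[Dict[str, Any]],
-- ) -> List[tuple]:
--     """
--     Prioritize endpoint templates based on config hints.
--
--     Args:
--         endpoint_templates: List of (method, path, requires_json) tuples
--         config_hints: Optional config hints from script inspection
--
--     Returns:
--         Prioritized list of endpoint templates
--     """
--     if not config_hints or "api_endpoints" not in config_hints: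
--         return endpoint_templates
--
--     # If we found API endpoints in config, prioritize matching paths
--     api_endpoints = config_hints.get("api_endpoints", [])
--     prioritized = []
--     remaining = list(endpoint_templates)
--
--     for api_endpoint in api_endpoints:
--         # Extract path from full URL if needed
--         if "/" in api_endpoint:
--             path = "/" + "/".join(api_endpoint.split("/")[-2:])
--         else:
--             path = api_endpoint
--
--         # Find matching templates
--         for template in remaining[:]:
--             _, template_path, _ = template
--             if path.lower() in template_path.lower() or template_path.lower() in path.lower():
--                 prioritized.append(template)
--                 remaining.remove(template)
--
--     # Add remaining templates
--     prioritized.extend(remaining)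
--     return prioritized
-- ===== SOURCE B (Python) =====
-- def _prioritize_endpoints(endpoint_templates, config_hints):
--     if not config_hints or "api_endpoints" not in config_hints:
--         return endpoint_templates
--
--     # Derive each hint's comparison path once, lowercased.
--     paths = []
--     for api_endpoint in config_hints.get("api_endpoints", []):
--         if "/" in api_endpoint:
--             path = "/" + "/".join(api_endpoint.split("/")[-2:])
--         else:
--             path = api_endpoint
--         paths.append(path.lower())
--
--     # Single pass: drop each template into the bucket of the first hint path
--     # it matches (bidirectional substring test), or the trailing bucket.
--     buckets = [[] for _ in range(len(paths) + 1)]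
--     for template in endpoint_templates:
--         tp = template[1].lower()
--         idx = next((i for i, p in enumerate(paths) if p in tp or tp in p), len(paths))
--         buckets[idx].append(template)
--     return [t for b in buckets for t in b]
-- ===== Notes on version B (the rewrite author's own statement) =====
-- stated objective: alternative
-- what changed: A repeatedly scans and shrinks a `remaining` list with list.remove once per config hint; B derives the lowered hint paths once, then makes a single pass over the templates, dropping each into the bucket of the first hint path it matches (or a trailing unmatched bucket) and concatenating the buckets.
import Mathlib
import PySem

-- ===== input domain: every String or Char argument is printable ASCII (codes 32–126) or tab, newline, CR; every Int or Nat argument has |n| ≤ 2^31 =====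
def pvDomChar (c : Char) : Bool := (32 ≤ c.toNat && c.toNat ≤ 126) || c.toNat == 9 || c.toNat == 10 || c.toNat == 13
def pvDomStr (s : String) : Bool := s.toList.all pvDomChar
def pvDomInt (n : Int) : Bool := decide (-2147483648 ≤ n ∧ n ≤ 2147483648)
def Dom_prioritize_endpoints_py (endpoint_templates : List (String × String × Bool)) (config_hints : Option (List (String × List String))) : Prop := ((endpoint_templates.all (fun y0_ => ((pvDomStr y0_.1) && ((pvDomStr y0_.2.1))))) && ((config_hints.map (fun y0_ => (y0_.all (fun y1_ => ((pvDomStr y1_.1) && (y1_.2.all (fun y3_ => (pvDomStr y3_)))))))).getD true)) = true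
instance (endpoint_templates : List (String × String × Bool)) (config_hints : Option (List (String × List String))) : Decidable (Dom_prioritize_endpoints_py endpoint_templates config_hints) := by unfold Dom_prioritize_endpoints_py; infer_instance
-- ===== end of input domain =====

-- B replaces A's repeated scan over a shrinking `remaining` list (one pass per hint, with
-- list.remove) by a single pass over the templates that drops each template into the bucket
-- of the first hint path it matches; objective: alternative decomposition (same result).

-- ===== PORT A =====
-- sep "/" is nonempty, so split? is always some
-- path derivation shared by both sources:  "/" + "/".join(ep.split("/")[-2:])  if "/" in ep  else ep
def pvPathOf (api_endpoint : String) : String :=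
  if PySem.Str.isIn "/" api_endpoint then
    "/" ++ PySem.Str.join "/" (PySem.List.slice ((PySem.Str.split? api_endpoint "/").getD []) (some (-2)) none)
  else api_endpoint

def prioritize_endpoints_py (endpoint_templates : List (String × String × Bool)) (config_hints : Option (List (String × List String))) : List (String × String × Bool) :=
  match config_hints with
  | none => endpoint_templates
  | some hints =>
    if hints.isEmpty || !(PySem.Dict.ofList hints).contains "api_endpoints" then endpoint_templates
    else
      let api_endpoints := (PySem.Dict.ofList hints).getD "api_endpoints" []
      -- prioritized, remaining as a pair of accumulators; inner loop iterates the copy remaining[:]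
      let res := api_endpoints.foldl
        (fun (st : List (String × String × Bool) × List (String × String × Bool)) api_endpoint =>
          let path := pvPathOf api_endpoint
          st.2.foldl
            (fun st2 template =>
              if PySem.Str.isIn (PySem.Str.lower path) (PySem.Str.lower template.2.1)
                 || PySem.Str.isIn (PySem.Str.lower template.2.1) (PySem.Str.lower path) then
                (st2.1 ++ [template],
                 match PySem.List.remove? st2.2 template with  -- remaining.remove(template); always succeeds
                 | some r => r
                 | none => st2.2)
              else st2)
            st)
        ([], endpoint_templates)
      res.1 ++ res.2

-- ===== PORT B =====
-- next((i for i, p in enumerate(paths) if p in tp or tp in p), len(paths))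
def pvFirstMatchIdxGo (tp : String) : List String → Nat → Nat
  | [], i => i
  | p :: rest, i =>
    if PySem.Str.isIn p tp || PySem.Str.isIn tp p then i else pvFirstMatchIdxGo tp rest (i + 1)

def prioritize_endpoints_py_alt (endpoint_templates : List (String × String × Bool)) (config_hints : Option (List (String × List String))) : List (String × String × Bool) :=
  match config_hints with
  | none => endpoint_templates
  | some hints =>
    if hints.isEmpty || !(PySem.Dict.ofList hints).contains "api_endpoints" then endpoint_templates
    else
      let api_endpoints := (PySem.Dict.ofList hints).getD "api_endpoints" []
      let paths := api_endpoints.foldl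
        (fun acc api_endpoint =>
          let path := pvPathOf api_endpoint
          acc ++ [PySem.Str.lower path]) []
      let buckets := endpoint_templates.foldl
        (fun (bs : List (List (String × String × Bool))) template =>
          let idx := pvFirstMatchIdxGo (PySem.Str.lower template.2.1) paths 0
          bs.set idx (bs.getD idx [] ++ [template]))
        (List.replicate (paths.length + 1) [])
      buckets.flatten

-- ===== PRECONDITION & SPEC =====
def Spec_prioritize_endpoints_py (endpoint_templates : List (String × String × Bool)) (config_hints : Option (List (String × List String))) (out : List (String × String × Bool)) : Prop := out = prioritize_endpoints_py_alt endpoint_templates config_hints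
instance (endpoint_templates : List (String × String × Bool)) (config_hints : Option (List (String × List String))) (out : List (String × String × Bool)) : Decidable (Spec_prioritize_endpoints_py endpoint_templates config_hints out) := by unfold Spec_prioritize_endpoints_py; infer_instance

-- ===== CLAIM (what is proved, stated in full; the proofs are below) =====
def Claim_equal_prioritize_endpoints_py : Prop := ∀ (endpoint_templates : List (String × String × Bool)) (config_hints : Option (List (String × List String))), Dom_prioritize_endpoints_py endpoint_templates config_hints → Spec_prioritize_endpoints_py endpoint_templates config_hints (prioritize_endpoints_py endpoint_templates config_hints)

-- ===== LEMMAS AND PROOFS =====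

-- the bidirectional lowercase substring test, with the hint path already lowered
def pvPred (p : String) (t : String × String × Bool) : Bool :=
  PySem.Str.isIn p (PySem.Str.lower t.2.1) || PySem.Str.isIn (PySem.Str.lower t.2.1) p

-- A's inner loop body and outer loop body, named
def pvInnerStep (p : String) (st2 : List (String × String × Bool) × List (String × String × Bool)) (template : String × String × Bool) : List (String × String × Bool) × List (String × String × Bool) :=
  if PySem.Str.isIn p (PySem.Str.lower template.2.1)
     || PySem.Str.isIn (PySem.Str.lower template.2.1) p then
    (st2.1 ++ [template],
     match PySem.List.remove? st2.2 template with
     | some r => r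
     | none => st2.2)
  else st2

def pvOuterStep (st : List (String × String × Bool) × List (String × String × Bool)) (p : String) : List (String × String × Bool) × List (String × String × Bool) :=
  st.2.foldl (pvInnerStep p) st

-- What A appends per hint path: the matching templates in order, then recurse on the rest
def pvBucketsFlat : List String → List (String × String × Bool) → List (String × String × Bool)
  | [], _ => []
  | p :: ps, ts => ts.filter (pvPred p) ++ pvBucketsFlat ps (ts.filter (fun t => !pvPred p t))

theorem pv_inner_loop (p : String) (rest : List (String × String × Bool)) :
    ∀ (acc keep : List (String × String × Bool)), (∀ x ∈ keep, pvPred p x = false) →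
    rest.foldl (pvInnerStep p) (acc, keep ++ rest)
      = (acc ++ rest.filter (pvPred p), keep ++ rest.filter (fun t => !pvPred p t)) := by
  induction rest with
  | nil => intro acc keep h; simp
  | cons t rest ih =>
    intro acc keep h
    by_cases hp : pvPred p t = true
    · have hraw := hp; simp only [pvPred] at hraw
      have htk : t ∉ keep := fun hm => by simp [h t hm] at hp
      have hrem : PySem.List.remove? (keep ++ t :: rest) t = some (keep ++ rest) := by
        rw [PySem.List.remove?_eq_some_erase _ t (by simp)]
        rw [List.erase_append_right _ htk, List.erase_cons_head]
      have hstep : pvInnerStep p (acc, keep ++ t :: rest) t = (acc ++ [t], keep ++ rest) := by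
        unfold pvInnerStep
        rw [if_pos hraw, hrem]
      simp only [List.foldl_cons, hstep]
      rw [ih (acc ++ [t]) keep h]
      simp [hp]
    · have hp' : pvPred p t = false := by simpa using hp
      have hraw := hp'; simp only [pvPred] at hraw
      have hstep : pvInnerStep p (acc, keep ++ t :: rest) t = (acc, (keep ++ [t]) ++ rest) := by
        unfold pvInnerStep
        rw [if_neg (by rw [hraw]; decide)]
        simp
      simp only [List.foldl_cons, hstep]
      rw [ih acc (keep ++ [t]) ?_]
      · simp [hp']
      · intro x hx
        rcases List.mem_append.1 hx with h1 | h1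
        · exact h x h1
        · simp only [List.mem_singleton] at h1; subst h1; exact hp'

theorem pv_outer_loop (ps : List String) :
    ∀ (acc rem : List (String × String × Bool)),
    ps.foldl pvOuterStep (acc, rem)
      = (acc ++ pvBucketsFlat ps rem, rem.filter (fun t => ps.all (fun p => !pvPred p t))) := by
  induction ps with
  | nil => intro acc rem; simp [pvBucketsFlat]
  | cons p ps ih =>
    intro acc rem
    have hstep : pvOuterStep (acc, rem) p = (acc ++ rem.filter (pvPred p), rem.filter (fun t => !pvPred p t)) := by
      have := pv_inner_loop p rem acc [] (by intro x hx; cases hx)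
      simpa [pvOuterStep] using this
    simp only [List.foldl_cons, hstep]
    rw [ih]
    simp [pvBucketsFlat, List.filter_filter, List.all_cons, Bool.and_comm]

theorem pv_go_succ (tp : String) (ps : List String) : ∀ i, pvFirstMatchIdxGo tp ps (i + 1) = pvFirstMatchIdxGo tp ps i + 1 := by
  induction ps with
  | nil => intro i; rfl
  | cons p ps ih =>
    intro i
    unfold pvFirstMatchIdxGo
    split <;> simp [ih]

theorem pv_go_le (tp : String) (ps : List String) : ∀ i, pvFirstMatchIdxGo tp ps i ≤ i + ps.length := by
  induction ps with
  | nil => intro i; simp [pvFirstMatchIdxGo]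
  | cons p ps ih =>
    intro i
    unfold pvFirstMatchIdxGo
    split
    · simp
    · have := ih (i + 1); simp only [List.length_cons]; omega

theorem pv_getD_map_range {α : Type} (g : Nat → List α) (m k : Nat) (hk : k < m) :
    ((List.range m).map g).getD k [] = g k := by
  rw [List.getD_eq_getElem?_getD]
  simp [hk]

theorem pv_set_map_range {α : Type} (g : Nat → List α) (m k : Nat) (v : List α) :
    ((List.range m).map g).set k v = (List.range m).map (fun i => if i = k then v else g i) := by
  apply List.ext_getElem
  · simp
  · intro n h1 h2
    simp only [List.getElem_set, List.getElem_map, List.getElem_range]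
    simp only [List.length_set, List.length_map, List.length_range] at h1
    by_cases hn : n = k
    · simp [hn]
    · simp [hn, Ne.symm hn]

theorem pv_bfold (ps : List String) (ts : List (String × String × Bool)) :
    ∀ (m : Nat) (g : Nat → List (String × String × Bool)),
    (∀ t : String × String × Bool, pvFirstMatchIdxGo (PySem.Str.lower t.2.1) ps 0 < m) →
    ts.foldl (fun bs t =>
        bs.set (pvFirstMatchIdxGo (PySem.Str.lower t.2.1) ps 0)
          (bs.getD (pvFirstMatchIdxGo (PySem.Str.lower t.2.1) ps 0) [] ++ [t]))
      ((List.range m).map g)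
      = (List.range m).map (fun i => g i ++ ts.filter (fun t => pvFirstMatchIdxGo (PySem.Str.lower t.2.1) ps 0 == i)) := by
  induction ts with
  | nil =>
    intro m g _
    simp
  | cons t ts ih =>
    intro m g hm
    simp only [List.foldl_cons]
    rw [pv_getD_map_range g m _ (hm t), pv_set_map_range g m _ _]
    rw [ih m _ hm]
    apply List.map_congr_left
    intro i hi
    by_cases hik : i = pvFirstMatchIdxGo (PySem.Str.lower t.2.1) ps 0
    · simp [hik]
    · simp [hik, Ne.symm hik]

theorem pv_bridge (ps : List String) :
    ∀ ts : List (String × String × Bool),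
    pvBucketsFlat ps ts ++ ts.filter (fun t => ps.all (fun p => !pvPred p t))
      = ((List.range (ps.length + 1)).map (fun i => ts.filter (fun t => pvFirstMatchIdxGo (PySem.Str.lower t.2.1) ps 0 == i))).flatten := by
  induction ps with
  | nil =>
    intro ts
    simp [pvBucketsFlat, pvFirstMatchIdxGo]
  | cons p ps ih =>
    intro ts
    have hkey : ∀ t : String × String × Bool,
        pvFirstMatchIdxGo (PySem.Str.lower t.2.1) (p :: ps) 0
          = if pvPred p t then 0 else pvFirstMatchIdxGo (PySem.Str.lower t.2.1) ps 0 + 1 := by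
      intro t
      rw [show pvFirstMatchIdxGo (PySem.Str.lower t.2.1) (p :: ps) 0
            = if PySem.Str.isIn p (PySem.Str.lower t.2.1) || PySem.Str.isIn (PySem.Str.lower t.2.1) p then 0
              else pvFirstMatchIdxGo (PySem.Str.lower t.2.1) ps 1 from rfl]
      rw [pv_go_succ]
      rfl
    simp only [List.length_cons]
    rw [List.range_succ_eq_map]
    simp only [List.map_cons, List.flatten_cons, List.map_map]
    have h0 : ts.filter (fun t => pvFirstMatchIdxGo (PySem.Str.lower t.2.1) (p :: ps) 0 == 0)
        = ts.filter (pvPred p) := by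
      apply List.filter_congr
      intro t _
      rw [hkey t]
      by_cases hp : pvPred p t <;> simp [hp]
    have hsucc : ((List.range (ps.length + 1)).map
          ((fun i => ts.filter (fun t => pvFirstMatchIdxGo (PySem.Str.lower t.2.1) (p :: ps) 0 == i)) ∘ Nat.succ))
        = (List.range (ps.length + 1)).map
          (fun i => (ts.filter (fun t => !pvPred p t)).filter (fun t => pvFirstMatchIdxGo (PySem.Str.lower t.2.1) ps 0 == i)) := by
      apply List.map_congr_left
      intro i _
      simp only [Function.comp]
      rw [List.filter_filter]
      apply List.filter_congr
      intro t _
      rw [hkey t]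
      by_cases hp : pvPred p t <;> simp [hp, Nat.succ_eq_add_one]
    have hall : ts.filter (fun t => (p :: ps).all (fun q => !pvPred q t))
        = (ts.filter (fun t => !pvPred p t)).filter (fun t => ps.all (fun q => !pvPred q t)) := by
      rw [List.filter_filter]
      apply List.filter_congr
      intro t _
      simp [Bool.and_comm]
    rw [h0, hsucc, hall]
    show pvBucketsFlat (p :: ps) ts ++ _ = _
    rw [show pvBucketsFlat (p :: ps) ts
          = ts.filter (pvPred p) ++ pvBucketsFlat ps (ts.filter (fun t => !pvPred p t)) from rfl]
    rw [List.append_assoc, ih (ts.filter (fun t => !pvPred p t))]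

theorem pv_core (ps : List String) (ts : List (String × String × Bool)) :
    (ps.foldl pvOuterStep ([], ts)).1 ++ (ps.foldl pvOuterStep ([], ts)).2
      = (ts.foldl (fun bs t =>
            bs.set (pvFirstMatchIdxGo (PySem.Str.lower t.2.1) ps 0)
              (bs.getD (pvFirstMatchIdxGo (PySem.Str.lower t.2.1) ps 0) [] ++ [t]))
          (List.replicate (ps.length + 1) [])).flatten := by
  rw [pv_outer_loop]
  rw [show (List.replicate (ps.length + 1) ([] : List (String × String × Bool)))
        = (List.range (ps.length + 1)).map (fun _ => []) from by simp]
  rw [pv_bfold ps ts (ps.length + 1) _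
        (fun t => Nat.lt_succ_of_le (by simpa using pv_go_le (PySem.Str.lower t.2.1) ps 0))]
  simpa using pv_bridge ps ts

-- ===== VERDICT (by name: the statement is the Claim_ definition above) =====
theorem prioritize_endpoints_py_spec : Claim_equal_prioritize_endpoints_py := by
  intro ts ch _
  unfold Spec_prioritize_endpoints_py
  cases ch with
  | none => rfl
  | some hints =>
    unfold prioritize_endpoints_py prioritize_endpoints_py_alt
    dsimp only
    by_cases hg : (hints.isEmpty || !(PySem.Dict.ofList hints).contains "api_endpoints") = true
    · simp only [hg, if_true]
    · rw [if_neg (by simp [hg]), if_neg (by simp [hg])]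
      show ((((PySem.Dict.ofList hints).getD "api_endpoints" []).foldl
              (fun st ep => pvOuterStep st (PySem.Str.lower (pvPathOf ep))) ([], ts)).1
            ++ (((PySem.Dict.ofList hints).getD "api_endpoints" []).foldl
              (fun st ep => pvOuterStep st (PySem.Str.lower (pvPathOf ep))) ([], ts)).2)
          = _
      rw [show (((PySem.Dict.ofList hints).getD "api_endpoints" []).foldl
              (fun st ep => pvOuterStep st (PySem.Str.lower (pvPathOf ep))) (([], ts) : _ × _))
            = ((((PySem.Dict.ofList hints).getD "api_endpoints" []).map
                (fun ep => PySem.Str.lower (pvPathOf ep))).foldl pvOuterStep ([], ts))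
          from List.foldl_map.symm]
      have hpaths : (((PySem.Dict.ofList hints).getD "api_endpoints" []).foldl
              (fun acc ep => acc ++ [PySem.Str.lower (pvPathOf ep)]) ([] : List String))
            = ((PySem.Dict.ofList hints).getD "api_endpoints" []).map
                (fun ep => PySem.Str.lower (pvPathOf ep)) := by
        rw [PySem.List.foldl_append_singleton_eq_map]
        rfl
      show _ = (ts.foldl
          (fun bs t =>
            bs.set (pvFirstMatchIdxGo (PySem.Str.lower t.2.1)
                (((PySem.Dict.ofList hints).getD "api_endpoints" []).foldl
                  (fun acc ep => acc ++ [PySem.Str.lower (pvPathOf ep)]) []) 0)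
              (bs.getD (pvFirstMatchIdxGo (PySem.Str.lower t.2.1)
                (((PySem.Dict.ofList hints).getD "api_endpoints" []).foldl
                  (fun acc ep => acc ++ [PySem.Str.lower (pvPathOf ep)]) []) 0) [] ++ [t]))
          (List.replicate ((((PySem.Dict.ofList hints).getD "api_endpoints" []).foldl
              (fun acc ep => acc ++ [PySem.Str.lower (pvPathOf ep)]) []).length + 1) [])).flatten
      rw [hpaths]
      exact pv_core _ ts
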